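-- pv_equiv track=rewrite | github.com/fatimasnoopy/AI-Debate-Arena- | reasoning_techniques.py | extract_reasoning_steps
-- ===== SOURCE A (Python) =====
-- from typing import Dict, List, Any, Optional
--
-- def extract_reasoning_steps(response: str) -> List[str]:
--     """Extract individual reasoning steps from CoT response"""
--     steps = []
--     lines = response.split('\n')
--     current_step = []
--
--     for line in lines:
--         if line.strip().startswith(('1.', '2.', '3.', '4.', '5.', 'First', 'Second', 'Third', 'Finally')):
--             if current_step:
--                 steps.append('\n'.join(current_step).strip())
--             current_step = [line]
--         else:
--             current_step.append(line)
--
--     if current_step: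
--         steps.append('\n'.join(current_step).strip())
--
--     return [step for step in steps if step.strip()]
-- ===== SOURCE B (Python) =====
-- from typing import Dict, List, Any, Optional
--
-- _MARKERS = ('1.', '2.', '3.', '4.', '5.', 'First', 'Second', 'Third', 'Finally')
--
-- def extract_reasoning_steps(response: str) -> List[str]:
--     """Extract reasoning steps: find marker-line indices, then slice the lines."""
--     lines = response.split('\n')
--     bounds = [i for i, line in enumerate(lines) if line.strip().startswith(_MARKERS)]
--     cuts = [0] + bounds + [len(lines)]
--     parts = ['\n'.join(lines[a:b]).strip() for a, b in zip(cuts, cuts[1:])]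
--     return [p for p in parts if p]
-- ===== Notes on version B (the rewrite author's own statement) =====
-- stated objective: alternative
-- what changed: Replaces A's single-pass flush-accumulator loop (append completed step when the next marker arrives, plus a final flush) with a two-phase index-then-slice shape: one pass collects the indices of marker lines, then the line list is partitioned by slicing between consecutive cut points, each slice joined, stripped and filtered.
import Mathlib
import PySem

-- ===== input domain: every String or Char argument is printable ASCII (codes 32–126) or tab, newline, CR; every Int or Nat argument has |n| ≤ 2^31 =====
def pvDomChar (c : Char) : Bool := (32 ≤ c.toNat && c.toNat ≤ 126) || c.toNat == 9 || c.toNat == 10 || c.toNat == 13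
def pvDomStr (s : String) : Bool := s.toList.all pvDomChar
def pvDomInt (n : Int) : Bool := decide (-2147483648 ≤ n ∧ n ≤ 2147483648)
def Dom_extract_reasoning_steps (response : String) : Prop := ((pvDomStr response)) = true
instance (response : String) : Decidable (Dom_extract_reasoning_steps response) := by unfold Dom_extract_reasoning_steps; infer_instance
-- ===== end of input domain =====

set_option maxHeartbeats 1000000


-- B replaces A's flush-accumulator loop with a two-phase index-then-slice shape
-- (collect marker-line indices, then partition the lines by slicing); objective: alternative.

-- the marker test both Pythons share: line.strip().startswith(('1.',...,'Finally'))
def pvMarker (line : String) : Bool :=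
  let t := PySem.Str.strip line
  PySem.Str.startswith t "1." || PySem.Str.startswith t "2." || PySem.Str.startswith t "3." ||
  PySem.Str.startswith t "4." || PySem.Str.startswith t "5." || PySem.Str.startswith t "First" ||
  PySem.Str.startswith t "Second" || PySem.Str.startswith t "Third" || PySem.Str.startswith t "Finally"

-- '\n'.join(g).strip(), used by both Pythons
def pvGrp (g : List String) : String := PySem.Str.strip (PySem.Str.join "\n" g)

-- ===== PORT A =====
def extract_reasoning_steps (response : String) : List String :=
  let lines := (PySem.Str.split? response "\n").getD []
  let st := lines.foldl
    (fun (st : List String × List String) line =>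
      if pvMarker line then
        ((if st.2.isEmpty then st.1 else st.1 ++ [pvGrp st.2]), [line])
      else (st.1, st.2 ++ [line]))
    ([], [])
  let steps := if st.2.isEmpty then st.1 else st.1 ++ [pvGrp st.2]
  steps.filter (fun step => PySem.Str.strip step != "")

-- ===== PORT B =====
def extract_reasoning_steps_alt (response : String) : List String :=
  let lines := (PySem.Str.split? response "\n").getD []
  let bounds := (PySem.List.enumerate lines 0).filterMap
    (fun p => if pvMarker p.2 then some p.1 else none)
  let cuts := (0 : Int) :: bounds ++ [(lines.length : Int)]
  let parts := (cuts.zip cuts.tail).map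
    (fun p => PySem.Str.strip (PySem.Str.join "\n" (PySem.List.slice lines (some p.1) (some p.2))))
  parts.filter (fun p => p != "")

-- ===== PRECONDITION & SPEC =====
def Spec_extract_reasoning_steps (response : String) (out : List String) : Prop := out = extract_reasoning_steps_alt response
instance (response : String) (out : List String) : Decidable (Spec_extract_reasoning_steps response out) := by unfold Spec_extract_reasoning_steps; infer_instance

-- ===== CLAIM (what is proved, stated in full; the proofs are below) =====
def Claim_equal_extract_reasoning_steps : Prop := ∀ (response : String), Dom_extract_reasoning_steps response → Spec_extract_reasoning_steps response (extract_reasoning_steps response)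

-- ===== LEMMAS AND PROOFS =====

-- named copy of A's loop body (definitionally equal to the lambda in the port)
def pvStepA : (List String × List String) → String → (List String × List String) :=
  fun (st : List String × List String) line =>
    if pvMarker line then
      ((if st.2.isEmpty then st.1 else st.1 ++ [pvGrp st.2]), [line])
    else (st.1, st.2 ++ [line])

-- canonical front-recursive chunking that A's loop computes
def pvChunk : List String → List String → List (List String)
  | cur, [] => [cur]
  | cur, l :: rest => if pvMarker l then cur :: pvChunk [l] rest else pvChunk (cur ++ [l]) rest

-- the marker-line indices, as B's enumerate/filterMap computes them (Nat form)
def pvBnds : List String → List Nat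
  | [] => []
  | l :: r => if pvMarker l then 0 :: (pvBnds r).map (· + 1) else (pvBnds r).map (· + 1)

-- adjacent-cuts slicing in Nat form
def pvSegs (lines : List String) : List Nat → List (List String)
  | a :: b :: r => ((lines.drop a).take (b - a)) :: pvSegs lines (b :: r)
  | _ => []

lemma pvA_chunk (lines : List String) : ∀ (steps cur : List String),
    (let st := List.foldl pvStepA (steps, cur) lines
     if st.2.isEmpty then st.1 else st.1 ++ [pvGrp st.2])
    = steps ++ ((pvChunk cur lines).filter (fun x => !x.isEmpty)).map pvGrp := by
  induction lines with
  | nil =>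
    intro steps cur
    cases cur <;> simp [pvChunk]
  | cons l rest ih =>
    intro steps cur
    simp only [List.foldl_cons]
    by_cases hm : pvMarker l
    · have : pvStepA (steps, cur) l = ((if cur.isEmpty then steps else steps ++ [pvGrp cur]), [l]) := by
        simp [pvStepA, hm]
      rw [this, ih]
      cases cur <;> simp [pvChunk, hm]
    · have : pvStepA (steps, cur) l = (steps, cur ++ [l]) := by simp [pvStepA, hm]
      rw [this, ih]
      simp [pvChunk, hm]

-- B's enumerate/filterMap computes pvBnds shifted by the start offset
lemma pvEnum_bnds (lines : List String) : ∀ (s : Int),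
    (PySem.List.enumerate lines s).filterMap (fun p => if pvMarker p.2 then some p.1 else none)
      = (pvBnds lines).map (fun (k : Nat) => s + (k : Int)) := by
  induction lines with
  | nil => intro s; rw [PySem.List.enumerate_nil]; rfl
  | cons l rest ih =>
    intro s
    rw [PySem.List.enumerate_cons, List.filterMap_cons]
    by_cases hm : pvMarker l
    · rw [show pvBnds (l :: rest) = 0 :: (pvBnds rest).map (· + 1) from by simp [pvBnds, hm]]
      rw [List.map_cons, List.map_map, ih (s + 1)]
      simp only [hm, if_true]
      congr 1
      · simp
      · exact List.map_congr_left (fun k _ => by simp only [Function.comp_def]; push_cast; ring)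
    · rw [show pvBnds (l :: rest) = (pvBnds rest).map (· + 1) from by simp [pvBnds, hm]]
      rw [List.map_map, ih (s + 1)]
      simp only [hm, if_false, Bool.false_eq_true]
      exact List.map_congr_left (fun k _ => by simp only [Function.comp_def]; push_cast; ring)

-- rfl equations for pvSegs
lemma pvSegs_nil (lines : List String) : pvSegs lines [] = [] := rfl
lemma pvSegs_single (lines : List String) (a : Nat) : pvSegs lines [a] = [] := rfl
lemma pvSegs_cons_cons (lines : List String) (a b : Nat) (r : List Nat) :
    pvSegs lines (a :: b :: r) = ((lines.drop a).take (b - a)) :: pvSegs lines (b :: r) := rfl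

-- the zip-of-cuts map in B equals pvSegs (slices read off via slice_natCast)
lemma pvZip_segs (lines : List String) (cuts : List Nat) :
    ((cuts.map (fun (k : Nat) => (k : Int))).zip (cuts.map (fun (k : Nat) => (k : Int))).tail).map
      (fun p => PySem.List.slice lines (some p.1) (some p.2))
      = pvSegs lines cuts := by
  induction cuts with
  | nil => simp [pvSegs_nil]
  | cons a t ih =>
    cases t with
    | nil => simp [pvSegs_single]
    | cons b r =>
      simp only [List.map_cons, List.tail_cons, List.zip_cons_cons] 
      simp only [List.map_cons, List.tail_cons] at ih
      rw [ih, pvSegs_cons_cons]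
      simp [PySem.List.slice_natCast]

-- shifting all cuts by a prefix's length drops the prefix
lemma pvSegs_shift (c xs : List String) : ∀ (cuts : List Nat),
    pvSegs (c ++ xs) (cuts.map (· + c.length)) = pvSegs xs cuts := by
  intro cuts
  induction cuts with
  | nil => simp [pvSegs_nil]
  | cons a t ih =>
    cases t with
    | nil => simp [pvSegs_single]
    | cons b r =>
      simp only [List.map_cons] at *
      rw [pvSegs_cons_cons, pvSegs_cons_cons, ih]
      congr 1
      have hd : (c ++ xs).drop (a + c.length) = xs.drop a := by
        rw [Nat.add_comm, List.drop_append]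
        rw [List.drop_eq_nil_of_le (by omega), List.nil_append]
        congr 1
        omega
      rw [hd]
      congr 1
      omega

-- main correspondence: slicing at the marker cuts is exactly A's chunking
lemma pvSegs_chunk (lines : List String) : ∀ (cur : List String),
    pvSegs (cur ++ lines) (0 :: (pvBnds lines).map (· + cur.length) ++ [cur.length + lines.length])
      = pvChunk cur lines := by
  induction lines with
  | nil =>
    intro cur
    simp only [pvBnds, List.map_nil, List.nil_append, List.length_nil, Nat.add_zero,
      List.append_nil, List.cons_append]
    rw [pvSegs_cons_cons, pvSegs_single, pvChunk]
    simp
  | cons l rest ih =>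
    intro cur
    by_cases hm : pvMarker l
    · rw [show pvBnds (l :: rest) = 0 :: (pvBnds rest).map (· + 1) from by simp [pvBnds, hm]]
      have hcuts : ((0 : Nat) :: (pvBnds rest).map (· + 1)).map (· + cur.length)
          = cur.length :: (pvBnds rest).map (· + (cur.length + 1)) := by
        rw [List.map_cons, List.map_map]
        congr 1
        · omega
        · exact List.map_congr_left (fun k _ => by simp only [Function.comp_def]; omega)
      rw [hcuts]
      have hlen : cur.length + (l :: rest).length = cur.length + (1 + rest.length) := by
        simp; omega
      rw [hlen]
      simp only [List.cons_append]
      rw [pvSegs_cons_cons]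
      have hfirst : ((cur ++ l :: rest).drop 0).take (cur.length - 0) = cur := by
        simp
      rw [hfirst]
      have hshift : (cur.length :: ((pvBnds rest).map (· + (cur.length + 1)) ++ [cur.length + (1 + rest.length)]))
          = (((0 : Nat) :: ((pvBnds rest).map (· + 1) ++ [1 + rest.length])).map (· + cur.length)) := by
        rw [List.map_cons, List.map_append, List.map_map]
        congr 1
        · omega
        · congr 1
          · exact List.map_congr_left (fun k _ => by simp only [Function.comp_def]; omega)
          · simp; omega
      rw [hshift, pvSegs_shift cur (l :: rest)]
      have hI := ih [l]
      simp only [List.singleton_append, List.length_cons, List.length_nil, Nat.zero_add] at hI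
      rw [show (0 : Nat) :: ((pvBnds rest).map (· + 1) ++ [1 + rest.length])
          = 0 :: (pvBnds rest).map (· + 1) ++ [1 + rest.length] from rfl]
      rw [hI]
      simp [pvChunk, hm]
    · rw [show pvBnds (l :: rest) = (pvBnds rest).map (· + 1) from by simp [pvBnds, hm]]
      have h1 : ((pvBnds rest).map (· + 1)).map (· + cur.length)
          = (pvBnds rest).map (· + (cur ++ [l]).length) := by
        rw [List.map_map]
        exact List.map_congr_left (fun k _ => by simp only [Function.comp_def]; simp; omega)
      have h2 : cur.length + (l :: rest).length = (cur ++ [l]).length + rest.length := by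
        simp; omega
      rw [h1, h2, show cur ++ l :: rest = (cur ++ [l]) ++ rest from by simp, ih (cur ++ [l])]
      simp [pvChunk, hm]

lemma pvGrp_nil : pvGrp [] = "" := by decide

-- dropping the empty chunks before mapping pvGrp changes nothing: they map to ""
lemma pvFilter_nonempty (L : List (List String)) :
    ((L.filter (fun x => !x.isEmpty)).map pvGrp).filter (fun s => s != "")
      = (L.map pvGrp).filter (fun s => s != "") := by
  induction L with
  | nil => simp
  | cons x t ih =>
    cases x with
    | nil => simp [pvGrp_nil, ih]
    | cons y ys => simp [List.filter_cons, ih]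

lemma pvChars_strip_idem (cs : List Char) :
    PySem.Chars.strip (PySem.Chars.strip cs) = PySem.Chars.strip cs := by
  unfold PySem.Chars.strip PySem.Chars.rstrip PySem.Chars.lstrip
  have hpre : (List.dropWhile PySem.Chars.isspace (List.dropWhile PySem.Chars.isspace cs).reverse).reverse
      <+: List.dropWhile PySem.Chars.isspace cs := by
    simpa using (List.dropWhile_suffix (l := (List.dropWhile PySem.Chars.isspace cs).reverse)
      PySem.Chars.isspace).reverse
  have hself : List.dropWhile PySem.Chars.isspace
      ((List.dropWhile PySem.Chars.isspace (List.dropWhile PySem.Chars.isspace cs).reverse).reverse)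
      = (List.dropWhile PySem.Chars.isspace (List.dropWhile PySem.Chars.isspace cs).reverse).reverse := by
    rw [List.dropWhile_eq_self_iff]
    intro hl
    rw [List.IsPrefix.getElem hpre hl]
    exact List.dropWhile_get_zero_not _ _ _
  rw [hself, List.reverse_reverse, List.dropWhile_idempotent]

lemma pvStr_strip_idem (s : String) :
    PySem.Str.strip (PySem.Str.strip s) = PySem.Str.strip s := by
  simp [PySem.Str.strip, String.toList_ofList, pvChars_strip_idem]

lemma pvStrip_grp (x : List String) : PySem.Str.strip (pvGrp x) = pvGrp x := by
  rw [pvGrp, pvStr_strip_idem]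

lemma pvFilter_eq (L : List (List String)) :
    (L.map pvGrp).filter (fun step => PySem.Str.strip step != "")
      = (L.map pvGrp).filter (fun s => s != "") := by
  refine List.filter_congr (fun s hs => ?_)
  obtain ⟨x, -, rfl⟩ := List.mem_map.mp hs
  rw [pvStrip_grp]

-- ===== VERDICT (by name: the statement is the Claim_ definition above) =====
theorem extract_reasoning_steps_spec : Claim_equal_extract_reasoning_steps := by
  intro response _
  unfold Spec_extract_reasoning_steps extract_reasoning_steps extract_reasoning_steps_alt
  simp only []
  set lines := (PySem.Str.split? response "\n").getD [] with hl
  -- A side: foldl = chunking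
  have hA := pvA_chunk lines [] []
  simp only [] at hA
  rw [show (List.foldl
      (fun (st : List String × List String) line =>
        if pvMarker line then
          ((if st.2.isEmpty then st.1 else st.1 ++ [pvGrp st.2]), [line])
        else (st.1, st.2 ++ [line])) ([], []) lines) = List.foldl pvStepA ([], []) lines from rfl]
  rw [hA]
  simp only [List.nil_append]
  -- B side: enumerate/filterMap + zip of cuts + slices = chunking
  have hB : ((((0 : Int) :: ((PySem.List.enumerate lines 0).filterMap
        (fun p => if pvMarker p.2 then some p.1 else none)) ++ [(lines.length : Int)]).zip
        (((0 : Int) :: ((PySem.List.enumerate lines 0).filterMap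
        (fun p => if pvMarker p.2 then some p.1 else none)) ++ [(lines.length : Int)]).tail)).map
        (fun p => PySem.Str.strip (PySem.Str.join "\n" (PySem.List.slice lines (some p.1) (some p.2)))))
      = (pvChunk [] lines).map pvGrp := by
    rw [pvEnum_bnds lines 0]
    have hmap : ((0 : Int) :: ((pvBnds lines).map (fun (k : Nat) => (0 : Int) + (k : Int))) ++ [(lines.length : Int)])
        = ((0 :: pvBnds lines ++ [lines.length]).map (fun (k : Nat) => (k : Int))) := by
      simp
    rw [hmap]
    have hcomp : (fun (p : Int × Int) => PySem.Str.strip (PySem.Str.join "\n" (PySem.List.slice lines (some p.1) (some p.2))))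
        = pvGrp ∘ (fun (p : Int × Int) => PySem.List.slice lines (some p.1) (some p.2)) := rfl
    rw [hcomp, ← List.map_map, pvZip_segs lines (0 :: pvBnds lines ++ [lines.length])]
    have := pvSegs_chunk lines []
    simp only [List.nil_append, List.length_nil, Nat.zero_add] at this
    rw [show (pvBnds lines).map (· + 0) = pvBnds lines from by simp] at this
    rw [this]
  rw [hB, pvFilter_eq, pvFilter_nonempty]
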